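-- pv_equiv track=rewrite | github.com/Ma-Jun-a/my_funny_exploration | print_ood_number.py | ood
-- ===== SOURCE A (Python) =====
-- def ood(n):
--     my_list = []
--     m = 0
--     k = 0
--     for i in range(n):
--         if i == m:
--             k += 1
--             m = k * 2 +1
--             my_list.append(i)
--     return my_list
-- ===== SOURCE B (Python) =====
-- def ood(n):
--     if n <= 0:
--         return []
--     return [0] + list(range(3, n, 2))
-- ===== Notes on version B (the rewrite author's own statement) =====
-- stated objective: simpler
-- what changed: Replaces the scan over every integer in range(n) with stateful k/m target tracking by a direct construction: guard n <= 0, then [0] plus a stride-2 range over exactly the odd numbers from 3 below n.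
import Mathlib
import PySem

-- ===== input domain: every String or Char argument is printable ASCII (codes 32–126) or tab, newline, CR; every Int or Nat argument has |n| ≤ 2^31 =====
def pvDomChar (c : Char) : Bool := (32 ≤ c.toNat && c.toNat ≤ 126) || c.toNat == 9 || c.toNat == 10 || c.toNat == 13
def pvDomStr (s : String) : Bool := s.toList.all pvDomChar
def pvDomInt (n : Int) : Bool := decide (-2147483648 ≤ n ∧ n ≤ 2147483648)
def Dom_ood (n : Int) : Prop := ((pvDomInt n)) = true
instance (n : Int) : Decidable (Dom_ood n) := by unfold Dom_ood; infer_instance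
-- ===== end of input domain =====

-- B replaces A's scan of every i in range(n) with k/m target tracking by a guarded
-- direct construction [0] + range(3, n, 2); objective: simpler.

-- ===== PORT A =====
-- state = (my_list, m, k)
def oodStep (s : List Int × Int × Int) (i : Int) : List Int × Int × Int :=
  if i = s.2.1 then (s.1 ++ [i], (s.2.2 + 1) * 2 + 1, s.2.2 + 1) else s

def ood (n : Int) : List Int :=
  ((PySem.List.pyRange 0 n 1).foldl oodStep ([], 0, 0)).1

-- ===== PORT B =====
def ood_alt (n : Int) : List Int :=
  if n ≤ 0 then [] else 0 :: PySem.List.pyRange 3 n 2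

-- ===== PRECONDITION & SPEC =====
def Spec_ood (n : Int) (out : List Int) : Prop := out = ood_alt n
instance (n : Int) (out : List Int) : Decidable (Spec_ood n out) := by unfold Spec_ood; infer_instance

-- ===== CLAIM (what is proved, stated in full; the proofs are below) =====
def Claim_equal_ood : Prop := ∀ (n : Int), Dom_ood n → Spec_ood n (ood n)

-- ===== LEMMAS AND PROOFS =====

-- After processing range(N) for N ≥ 2, A's loop state is fully determined:
-- the list is 0 followed by the first N/2 - 1 odd numbers from 3, k = N/2, m = 2*(N/2)+1.
lemma ood_loop_eq (N : Nat) (h : 2 ≤ N) :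
    (PySem.List.pyRange 0 (N : Int) 1).foldl oodStep ([], 0, 0)
    = (0 :: (List.range (N / 2 - 1)).map (fun k => (3 : Int) + 2 * ↑k),
       2 * ((N / 2 : Nat) : Int) + 1, ((N / 2 : Nat) : Int)) := by
  induction N, h using Nat.le_induction with
  | base => decide
  | succ M hM ih =>
    have hcast : ((M + 1 : Nat) : Int) = (M : Int) + 1 := by push_cast; ring
    rw [hcast, PySem.List.pyRange_one_succ_right (by exact_mod_cast Nat.zero_le M),
        List.foldl_concat, ih]
    by_cases hodd : M % 2 = 1
    · -- i = M hits the target m: append, bump k and m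
      have htrig : (M : Int) = 2 * ((M / 2 : Nat) : Int) + 1 := by omega
      have hk : (M + 1) / 2 = M / 2 + 1 := by omega
      have hlast : (3 : Int) + 2 * ((M / 2 - 1 : Nat) : Int) = 2 * ((M / 2 : Nat) : Int) + 1 := by
        omega
      simp only [oodStep, htrig, if_true, hk, List.cons_append]
      rw [show M / 2 + 1 - 1 = (M / 2 - 1) + 1 from by omega, List.range_succ, List.map_append]
      simp only [List.map_cons, List.map_nil, hlast, Prod.mk.injEq]
      exact ⟨by trivial, by push_cast; ring, by push_cast; ring⟩
    · -- i = M misses the target (M even): state unchanged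
      have hne : (M : Int) ≠ 2 * ((M / 2 : Nat) : Int) + 1 := by omega
      have hk : (M + 1) / 2 = M / 2 := by omega
      simp only [oodStep, if_neg hne, hk]

theorem ood_spec : Claim_equal_ood := by
  intro n _
  unfold Spec_ood ood ood_alt
  by_cases h0 : n ≤ 0
  · rw [PySem.List.pyRange_one_eq_nil h0, if_pos h0]
    rfl
  · rw [if_neg h0]
    by_cases h1 : n = 1
    · subst h1; decide
    · have h2 : 2 ≤ n := by omega
      obtain ⟨N, rfl⟩ : ∃ N : Nat, n = (N : Int) := ⟨n.toNat, by omega⟩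
      have hN : 2 ≤ N := by exact_mod_cast h2
      rw [ood_loop_eq N hN]
      rw [PySem.List.pyRange_of_pos 3 (N : Int) (by norm_num)]
      have hcount : N / 2 - 1
          = (if (3 : Int) < (N : Int) then (((N : Int) - 3 + 2 - 1) / 2).toNat else 0) := by
        split_ifs with h3
    -- so it remains to match the element counts
        · omega
        · omega
      rw [hcount]
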